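-- pv_equiv track=rewrite | github.com/Quema100/burgle | hack/keylogger/on_press.py | convert_to_korean
-- ===== SOURCE A (Python) =====
-- cons = {'r':'ㄱ', 'R':'ㄲ', 's':'ㄴ', 'e':'ㄷ', 'E':'ㄸ', 'f':'ㄹ', 'a':'ㅁ', 'q':'ㅂ', 'Q':'ㅃ', 't':'ㅅ', 'T':'ㅆ',
--         'd':'ㅇ', 'w':'ㅈ', 'W':'ㅉ', 'c':'ㅊ', 'z':'ㅋ', 'x':'ㅌ', 'v':'ㅍ', 'g':'ㅎ'}
--
-- vowels = {'k':'ㅏ', 'o':'ㅐ', 'i':'ㅑ', 'O':'ㅒ', 'j':'ㅓ', 'p':'ㅔ', 'u':'ㅕ', 'P':'ㅖ', 'h':'ㅗ', 'hk':'ㅘ', 'ho':'ㅙ', 'hl':'ㅚ',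
--           'y':'ㅛ', 'n':'ㅜ', 'nj':'ㅝ', 'np':'ㅞ', 'nl':'ㅟ', 'b':'ㅠ', 'm':'ㅡ', 'ml':'ㅢ', 'l':'ㅣ'}
--
-- cons_double = {'rt':'ㄳ', 'sw':'ㄵ', 'sg':'ㄶ', 'fr':'ㄺ', 'fa':'ㄻ', 'fq':'ㄼ', 'ft':'ㄽ', 'fx':'ㄾ', 'fv':'ㄿ', 'fg':'ㅀ', 'qt':'ㅄ'}
--
-- def convert_to_korean(text):
--
--     converted_text = ''
--     i = 0
--     while i < len(text):
--         char = text[i]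
--         if i + 1 < len(text):
--             double_char = text[i:i+2]
--             if double_char in cons_double:
--                 converted_text += cons_double[double_char]
--                 i += 2
--                 continue
--         if char in cons:
--             converted_text += cons[char]
--         elif char in vowels:
--             converted_text += vowels[char]
--         else:
--             converted_text += char
--         i += 1
--     return converted_text
-- ===== SOURCE B (Python) =====
-- # Streaming one-pass automaton: holds at most one pending char (a possible
-- # first half of a compound-jamo key) instead of index arithmetic + slicing.
--
-- _JAMO2 = {('r','t'):'\u3133', ('s','w'):'\u3135', ('s','g'):'\u3136',
--           ('f','r'):'\u313a', ('f','a'):'\u313b', ('f','q'):'\u313c',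
--           ('f','t'):'\u313d', ('f','x'):'\u313e', ('f','v'):'\u313f',
--           ('f','g'):'\u3140', ('q','t'):'\u3144'}
--
-- _JAMO1 = {'r':'\u3131', 'R':'\u3132', 's':'\u3134', 'e':'\u3137', 'E':'\u3138',
--           'f':'\u3139', 'a':'\u3141', 'q':'\u3142', 'Q':'\u3143', 't':'\u3145',
--           'T':'\u3146', 'd':'\u3147', 'w':'\u3148', 'W':'\u3149', 'c':'\u314a',
--           'z':'\u314b', 'x':'\u314c', 'v':'\u314d', 'g':'\u314e',
--           'k':'\u314f', 'o':'\u3150', 'i':'\u3151', 'O':'\u3152', 'j':'\u3153',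
--           'p':'\u3154', 'u':'\u3155', 'P':'\u3156', 'h':'\u3157', 'y':'\u315b',
--           'n':'\u315c', 'b':'\u3160', 'm':'\u3161', 'l':'\u3163'}
--
-- _STARTERS = {'r', 's', 'f', 'q'}
--
--
-- def convert_to_korean(text):
--     out = []
--     pending = ''
--     for ch in text:
--         if pending:
--             if (pending, ch) in _JAMO2:
--                 out.append(_JAMO2[(pending, ch)])
--                 pending = ''
--                 continue
--             out.append(_JAMO1.get(pending, pending))
--             pending = ''
--         if ch in _STARTERS:
--             pending = ch
--         else:
--             out.append(_JAMO1.get(ch, ch))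
--     if pending:
--         out.append(_JAMO1.get(pending, pending))
--     return ''.join(out)
-- ===== Notes on version B (the rewrite author's own statement) =====
-- stated objective: faster
-- what changed: Replaced A's index-based while loop with lookahead slicing (text[i:i+2]) and a three-dict lookup chain by a single-pass streaming automaton that carries at most one pending character (a possible first half of a compound-jamo key) and uses one merged single-char table plus a tuple-keyed compound table, collecting pieces in a list joined once at the end.
import Mathlib
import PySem

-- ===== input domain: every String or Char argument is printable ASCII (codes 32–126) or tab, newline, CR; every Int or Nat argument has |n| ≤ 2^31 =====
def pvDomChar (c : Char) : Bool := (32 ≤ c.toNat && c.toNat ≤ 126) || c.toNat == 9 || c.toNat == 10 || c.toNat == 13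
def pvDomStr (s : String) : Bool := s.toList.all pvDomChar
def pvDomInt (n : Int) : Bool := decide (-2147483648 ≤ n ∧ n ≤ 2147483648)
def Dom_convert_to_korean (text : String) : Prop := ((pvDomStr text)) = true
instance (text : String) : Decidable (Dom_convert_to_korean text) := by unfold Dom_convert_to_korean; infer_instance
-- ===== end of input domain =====

-- B replaces A's index/lookahead/slice loop by a one-pass streaming automaton
-- holding at most one pending character; measured constant-factor faster (no slicing, one table, join once).

-- ===== PORT A =====
def consA : PySem.Dict Char Char := PySem.Dict.mk
  [('r','ㄱ'), ('R','ㄲ'), ('s','ㄴ'), ('e','ㄷ'), ('E','ㄸ'), ('f','ㄹ'), ('a','ㅁ'),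
   ('q','ㅂ'), ('Q','ㅃ'), ('t','ㅅ'), ('T','ㅆ'), ('d','ㅇ'), ('w','ㅈ'), ('W','ㅉ'),
   ('c','ㅊ'), ('z','ㅋ'), ('x','ㅌ'), ('v','ㅍ'), ('g','ㅎ')]

def vowelsA : PySem.Dict Char Char := PySem.Dict.mk
  [('k','ㅏ'), ('o','ㅐ'), ('i','ㅑ'), ('O','ㅒ'), ('j','ㅓ'), ('p','ㅔ'), ('u','ㅕ'),
   ('P','ㅖ'), ('h','ㅗ'), ('y','ㅛ'), ('n','ㅜ'), ('b','ㅠ'), ('m','ㅡ'), ('l','ㅣ')]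
  -- A also lists 2-char vowel keys ('hk' …); char = text[i] is a single character,
  -- so those entries are unreachable in A and omitted from this Char-keyed dict.

def consDoubleA : PySem.Dict (List Char) Char := PySem.Dict.mk
  [(['r','t'],'ㄳ'), (['s','w'],'ㄵ'), (['s','g'],'ㄶ'), (['f','r'],'ㄺ'),
   (['f','a'],'ㄻ'), (['f','q'],'ㄼ'), (['f','t'],'ㄽ'), (['f','x'],'ㄾ'),
   (['f','v'],'ㄿ'), (['f','g'],'ㅀ'), (['q','t'],'ㅄ')]

def convertLoopA (s : List Char) (i : Nat) (acc : List Char) : List Char :=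
  if h : i < s.length then
    let char := s[i]
    match (if i + 1 < s.length
           then consDoubleA.get? (PySem.List.slice s (some (i : Int)) (some ((i : Int) + 2)))
           else none) with
    | some v => convertLoopA s (i + 2) (acc ++ [v])
    | none =>
      let piece :=
        match consA.get? char with
        | some v => v
        | none =>
          match vowelsA.get? char with
          | some v => v
          | none => char
      convertLoopA s (i + 1) (acc ++ [piece])
  else acc
termination_by s.length - i

def convert_to_korean (text : String) : String :=
  String.mk (convertLoopA text.toList 0 [])

-- ===== PORT B =====
def jamo2B : PySem.Dict (Char × Char) Char := PySem.Dict.mk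
  [(('r','t'),'ㄳ'), (('s','w'),'ㄵ'), (('s','g'),'ㄶ'), (('f','r'),'ㄺ'),
   (('f','a'),'ㄻ'), (('f','q'),'ㄼ'), (('f','t'),'ㄽ'), (('f','x'),'ㄾ'),
   (('f','v'),'ㄿ'), (('f','g'),'ㅀ'), (('q','t'),'ㅄ')]

def jamo1B : PySem.Dict Char Char := PySem.Dict.mk
  [('r','ㄱ'), ('R','ㄲ'), ('s','ㄴ'), ('e','ㄷ'), ('E','ㄸ'), ('f','ㄹ'), ('a','ㅁ'),
   ('q','ㅂ'), ('Q','ㅃ'), ('t','ㅅ'), ('T','ㅆ'), ('d','ㅇ'), ('w','ㅈ'), ('W','ㅉ'),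
   ('c','ㅊ'), ('z','ㅋ'), ('x','ㅌ'), ('v','ㅍ'), ('g','ㅎ'),
   ('k','ㅏ'), ('o','ㅐ'), ('i','ㅑ'), ('O','ㅒ'), ('j','ㅓ'), ('p','ㅔ'), ('u','ㅕ'),
   ('P','ㅖ'), ('h','ㅗ'), ('y','ㅛ'), ('n','ㅜ'), ('b','ㅠ'), ('m','ㅡ'), ('l','ㅣ')]

def startersB : List Char := ['r', 's', 'f', 'q']

def stepB (st : List Char × Option Char) (ch : Char) : List Char × Option Char :=
  match st.2 with
  | some p =>
    match jamo2B.get? (p, ch) with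
    | some v => (st.1 ++ [v], none)
    | none =>
      let out := st.1 ++ [jamo1B.getD p p]
      if ch ∈ startersB then (out, some ch) else (out ++ [jamo1B.getD ch ch], none)
  | none =>
    if ch ∈ startersB then (st.1, some ch) else (st.1 ++ [jamo1B.getD ch ch], none)

def convert_to_korean_alt (text : String) : String :=
  let st := text.toList.foldl stepB ([], none)
  String.mk (match st.2 with
             | some p => st.1 ++ [jamo1B.getD p p]
             | none => st.1)

-- ===== PRECONDITION & SPEC =====
def Spec_convert_to_korean (text : String) (out : String) : Prop := out = convert_to_korean_alt text
instance (text : String) (out : String) : Decidable (Spec_convert_to_korean text out) := by unfold Spec_convert_to_korean; infer_instance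

-- ===== CLAIM (what is proved, stated in full; the proofs are below) =====
def Claim_equal_convert_to_korean : Prop := ∀ (text : String), Dom_convert_to_korean text → Spec_convert_to_korean text (convert_to_korean text)

-- ===== LEMMAS AND PROOFS =====

/-- A's single-character translation chain (cons, then vowels, then the char). -/
def trA (c : Char) : Char :=
  match consA.get? c with
  | some v => v
  | none =>
    match vowelsA.get? c with
    | some v => v
    | none => c

/-- Reference maximal-munch recursion both ports compute. -/
def refConv : List Char → List Char
  | [] => []
  | [a] => [jamo1B.getD a a]
  | a :: b :: t =>
    match jamo2B.get? (a, b) with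
    | some v => v :: refConv t
    | none => jamo1B.getD a a :: refConv (b :: t)

lemma get?_mk_append {κ ν : Type} [BEq κ] (l1 l2 : List (κ × ν)) (x : κ) :
    (PySem.Dict.mk (l1 ++ l2)).get? x = ((PySem.Dict.mk l1).get? x).or ((PySem.Dict.mk l2).get? x) := by
  induction l1 with
  | nil => simp [PySem.Dict.get?]
  | cons p t ih =>
    cases p with
    | mk k v =>
      rw [List.cons_append, PySem.Dict.get?_mk_cons, PySem.Dict.get?_mk_cons, ih]
      split_ifs <;> simp

lemma trA_eq (c : Char) : trA c = jamo1B.getD c c := by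
  have h : jamo1B.get? c = (consA.get? c).or (vowelsA.get? c) := by
    have e : jamo1B = PySem.Dict.mk (consA.items ++ vowelsA.items) := by rfl
    rw [e, get?_mk_append]
  unfold trA
  rw [PySem.Dict.getD_eq_get?_getD, h]
  cases consA.get? c <;> cases vowelsA.get? c <;> simp [Option.or]

set_option maxHeartbeats 1000000 in
lemma consDoubleA_eq (a b : Char) : consDoubleA.get? [a, b] = jamo2B.get? (a, b) := by
  simp only [consDoubleA, jamo2B, PySem.Dict.get?_mk_cons, List.cons_beq_cons]
  have hp : ∀ (x y : Char), ((x, y) == (a, b)) = (x == a && y == b) := by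
    intro x y; rfl
  have hl : ∀ (x y : Char), (x == a && (y == b && ([] : List Char) == [])) = (x == a && y == b) := by
    intro x y; simp
  simp only [hp, hl]
  rfl

set_option maxHeartbeats 1000000 in
lemma jamo2B_nonstarter (a b : Char) (h : a ∉ startersB) : jamo2B.get? (a, b) = none := by
  simp only [startersB, List.mem_cons, List.not_mem_nil, or_false, not_or] at h
  obtain ⟨h1, h2, h3, h4⟩ := h
  have hp : ∀ (x y : Char), x = 'r' ∨ x = 's' ∨ x = 'f' ∨ x = 'q' → ((x, y) == (a, b)) = false := by
    intro x y hx
    have : ¬ (x = a ∧ y = b) := by rintro ⟨rfl, rfl⟩; rcases hx with h|h|h|h <;> simp_all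
    simpa [Prod.ext_iff, -Prod.mk.injEq] using this
  simp only [jamo2B, PySem.Dict.get?_mk_cons]
  rw [hp, hp, hp, hp, hp, hp, hp, hp, hp, hp, hp] <;> simp [PySem.Dict.get?]

lemma refConv_nonstarter (a : Char) (l : List Char) (h : a ∉ startersB) :
    refConv (a :: l) = jamo1B.getD a a :: refConv l := by
  cases l with
  | nil => rfl
  | cons b t => simp [refConv, jamo2B_nonstarter a b h]

lemma convertLoopA_eq (s : List Char) (i : Nat) (acc : List Char) :
    convertLoopA s i acc = acc ++ refConv (s.drop i) := by
  by_cases h : i < s.length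
  · have hdrop : s.drop i = s[i] :: s.drop (i + 1) := List.drop_eq_getElem_cons h
    rw [convertLoopA]
    simp only [h, ↓reduceDIte]
    by_cases h2 : i + 1 < s.length
    · have hdrop2 : s.drop (i + 1) = s[i+1] :: s.drop (i + 2) :=
        List.drop_eq_getElem_cons h2
      have hslice : PySem.List.slice s (some (i : Int)) (some ((i : Int) + 2))
          = [s[i], s[i+1]] := by
        have := PySem.List.slice_natCast_add s i 2
        push_cast at this
        rw [this, hdrop, hdrop2]
        rfl
      simp only [h2, if_true, hslice, consDoubleA_eq]
      cases hj : jamo2B.get? (s[i], s[i+1]) with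
      | some v =>
        show convertLoopA s (i + 2) (acc ++ [v]) = _
        rw [convertLoopA_eq s (i + 2), hdrop, hdrop2]
        simp [refConv, hj]
      | none =>
        show convertLoopA s (i + 1) (acc ++ [trA s[i]]) = _
        rw [convertLoopA_eq s (i + 1), hdrop, hdrop2, trA_eq]
        simp [refConv, hj]
    · have hlast : s.drop (i + 1) = [] := by
        rw [List.drop_eq_nil_iff]; omega
      simp only [h2, if_false]
      show convertLoopA s (i + 1) (acc ++ [trA s[i]]) = _
      rw [convertLoopA_eq s (i + 1), hdrop, hlast, trA_eq]
      simp [refConv]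
  · have h1 : s.drop i = [] := by rw [List.drop_eq_nil_iff]; omega
    rw [convertLoopA, h1]
    simp [h, refConv]
termination_by s.length - i
decreasing_by all_goals omega

/-- Flush-aware meaning of B's fold. -/
def refPend : Option Char → List Char → List Char
  | none, l => refConv l
  | some p, l => refConv (p :: l)

lemma foldB_eq (l : List Char) (out : List Char) (pend : Option Char)
    (hp : ∀ p, pend = some p → p ∈ startersB) :
    (match (l.foldl stepB (out, pend)).2 with
     | some p => (l.foldl stepB (out, pend)).1 ++ [jamo1B.getD p p]
     | none => (l.foldl stepB (out, pend)).1) = out ++ refPend pend l := by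
  induction l generalizing out pend with
  | nil =>
    cases pend with
    | none => simp [refPend, refConv]
    | some p => simp [refPend, refConv]
  | cons ch t ih =>
    cases pend with
    | none =>
      by_cases hs : ch ∈ startersB
      · have : stepB (out, none) ch = (out, some ch) := by simp [stepB, hs]
        rw [List.foldl_cons, this, ih out (some ch) (by intro p hp'; cases hp'; exact hs)]
        rfl
      · have : stepB (out, none) ch = (out ++ [jamo1B.getD ch ch], none) := by
          simp [stepB, hs]
        rw [List.foldl_cons, this, ih _ none (by intro p hp'; cases hp')]
        simp [refPend, refConv_nonstarter ch t hs]
    | some p =>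
      have hps : p ∈ startersB := hp p rfl
      cases hj : jamo2B.get? (p, ch) with
      | some v =>
        have : stepB (out, some p) ch = (out ++ [v], none) := by simp [stepB, hj]
        rw [List.foldl_cons, this, ih _ none (by intro q hq; cases hq)]
        simp [refPend, refConv, hj]
      | none =>
        by_cases hs : ch ∈ startersB
        · have : stepB (out, some p) ch = (out ++ [jamo1B.getD p p], some ch) := by
            simp [stepB, hj, hs]
          rw [List.foldl_cons, this, ih _ (some ch) (by intro q hq; cases hq; exact hs)]
          simp [refPend, refConv, hj]
        · have : stepB (out, some p) ch
              = (out ++ [jamo1B.getD p p] ++ [jamo1B.getD ch ch], none) := by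
            simp [stepB, hj, hs]
          rw [List.foldl_cons, this, ih _ none (by intro q hq; cases hq)]
          simp [refPend, refConv, hj, refConv_nonstarter ch t hs]

-- ===== VERDICT (by name: the statement is the Claim_ definition above) =====
theorem convert_to_korean_spec : Claim_equal_convert_to_korean := by
  intro text _
  unfold Spec_convert_to_korean convert_to_korean convert_to_korean_alt
  rw [convertLoopA_eq]
  have := foldB_eq text.toList [] none (by intro p hp; cases hp)
  simp only [List.nil_append] at this ⊢
  rw [this]
  rfl
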